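-- pv_equiv track=rewrite | github.com/gitmengzh/leetcode | house_robber.py | house_robber
-- ===== SOURCE A (Python) =====
-- def house_robber(nums):
--     result1 = 0
--     result2 = 0
--     for i in range(len(nums)):
--         result1 = result1 +nums[i]
--         if 2*i < len(nums):
--             result2 = result2 +nums[2*i]
--     if result1 - result2 > result2:
--         return result1-result2
--     else:
--         return result2
-- ===== SOURCE B (Python) =====
-- def house_robber(nums):
--     even = 0
--     odd = 0
--     take_even = True
--     for x in nums:
--         if take_even:
--             even = even + x
--         else:
--             odd = odd + x
--         take_even = not take_even
--     return odd if odd > even else even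
-- ===== Notes on version B (the rewrite author's own statement) =====
-- stated objective: simpler
-- what changed: Replaces A's index loop (which re-reads nums[2*i] under a bounds test to collect the even-indexed sum alongside the total) with a single element-wise pass that toggles a parity flag and accumulates the even- and odd-indexed sums directly, no indexing or subtraction needed.
import Mathlib
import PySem

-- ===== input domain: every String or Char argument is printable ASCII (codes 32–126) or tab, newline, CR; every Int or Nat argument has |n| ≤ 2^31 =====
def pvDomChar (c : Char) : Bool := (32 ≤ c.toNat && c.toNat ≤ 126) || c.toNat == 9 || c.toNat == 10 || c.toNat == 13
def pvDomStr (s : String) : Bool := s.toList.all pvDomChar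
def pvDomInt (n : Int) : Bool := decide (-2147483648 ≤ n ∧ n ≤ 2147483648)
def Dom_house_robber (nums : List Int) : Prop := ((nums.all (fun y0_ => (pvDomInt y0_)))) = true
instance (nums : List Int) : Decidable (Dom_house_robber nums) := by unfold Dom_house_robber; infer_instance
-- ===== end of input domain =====

-- B replaces A's index loop (with its 2*i bounds-tested re-reads) by a single element-wise
-- pass toggling a parity flag to accumulate the even- and odd-indexed sums directly (simpler).


-- ===== PORT A =====
def house_robber (nums : List Int) : Int :=
  let st := (PySem.List.pyRange 0 (PySem.List.len nums) 1).foldl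
    (fun (st : Int × Int) i =>
      (st.1 + PySem.List.pyGetD nums i 0,
       if 2 * i < PySem.List.len nums then st.2 + PySem.List.pyGetD nums (2 * i) 0 else st.2))
    (0, 0)
  if st.1 - st.2 > st.2 then st.1 - st.2 else st.2

-- ===== PORT B =====
def house_robber_alt (nums : List Int) : Int :=
  let st := nums.foldl
    (fun (st : Int × Int × Bool) x =>
      if st.2.2 then (st.1 + x, st.2.1, false) else (st.1, st.2.1 + x, true))
    (0, 0, true)
  if st.2.1 > st.1 then st.2.1 else st.1

-- ===== PRECONDITION & SPEC =====
def Spec_house_robber (nums : List Int) (out : Int) : Prop := out = house_robber_alt nums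
instance (nums : List Int) (out : Int) : Decidable (Spec_house_robber nums out) := by unfold Spec_house_robber; infer_instance

-- ===== CLAIM (what is proved, stated in full; the proofs are below) =====
def Claim_equal_house_robber : Prop := ∀ (nums : List Int), Dom_house_robber nums → Spec_house_robber nums (house_robber nums)

-- ===== LEMMAS AND PROOFS =====

-- (even-indexed sum, odd-indexed sum) of a list
def pvEO : List Int → Int × Int
  | [] => (0, 0)
  | x :: xs => (x + (pvEO xs).2, (pvEO xs).1)

theorem pvEO_add (l : List Int) : (pvEO l).1 + (pvEO l).2 = l.sum := by
  induction l with
  | nil => simp [pvEO]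
  | cons x t ih => simp [pvEO, List.sum_cons]; omega

-- the two parity-restricted range sums appearing in A's loop
theorem pvEO_sum (l : List Int) :
    (∀ m : Nat, l.length ≤ 2 * m →
      ((List.range m).map (fun k => if 2 * k < l.length then l.getD (2 * k) 0 else 0)).sum
        = (pvEO l).1) ∧
    (∀ m : Nat, l.length ≤ 2 * m + 1 →
      ((List.range m).map (fun k => if 2 * k + 1 < l.length then l.getD (2 * k + 1) 0 else 0)).sum
        = (pvEO l).2) := by
  induction l with
  | nil =>
    constructor <;> intro m _ <;>
      · rw [List.sum_eq_zero]
        · simp [pvEO]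
        · intro x hx
          simp only [List.mem_map] at hx
          obtain ⟨k, -, hk⟩ := hx
          simpa using hk.symm
  | cons a t ih =>
    constructor
    · intro m hm
      match m with
      | 0 => simp at hm
      | m' + 1 =>
        rw [List.range_succ_eq_map]
        simp only [List.map_cons, List.map_map, List.sum_cons]
        have h0 : (if 2 * 0 < (a :: t).length then (a :: t).getD (2 * 0) 0 else 0) = a := by
          simp
        rw [h0]
        have hrest :
            ((List.range m').map
              ((fun k => if 2 * k < (a :: t).length then (a :: t).getD (2 * k) 0 else 0) ∘ Nat.succ)).sum
              = (pvEO t).2 := by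
          rw [show ((fun k => if 2 * k < (a :: t).length then (a :: t).getD (2 * k) 0 else 0) ∘ Nat.succ)
              = (fun k => if 2 * k + 1 < t.length then t.getD (2 * k + 1) 0 else 0) from ?_]
          · exact ih.2 m' (by simp at hm ⊢; omega)
          · funext k
            simp only [Function.comp, List.length_cons, Nat.succ_eq_add_one]
            have harith : 2 * (k + 1) = 2 * k + 1 + 1 := by omega
            rw [harith]
            by_cases h : 2 * k + 1 < t.length
            · simp [h]
            · simp [h]
        rw [hrest]
        simp [pvEO]
    · intro m hm
      rw [show (fun k => if 2 * k + 1 < (a :: t).length then (a :: t).getD (2 * k + 1) 0 else 0)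
          = (fun k => if 2 * k < t.length then t.getD (2 * k) 0 else 0) from ?_]
      · rw [ih.1 m (by simp at hm ⊢; omega)]
        simp [pvEO]
      · funext k
        simp only [List.length_cons, Nat.add_lt_add_iff_right, List.getD_cons_succ]

-- characterisation of A's loop result
theorem pvA_fold (nums : List Int) :
    ((PySem.List.pyRange 0 (PySem.List.len nums) 1).foldl
      (fun (st : Int × Int) i =>
        (st.1 + PySem.List.pyGetD nums i 0,
         if 2 * i < PySem.List.len nums then st.2 + PySem.List.pyGetD nums (2 * i) 0 else st.2))
      (0, 0))
      = (nums.sum, (pvEO nums).1) := by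
  have hsplit := PySem.List.foldl_prod_mk
    (fun (s : Int) (i : Int) => s + PySem.List.pyGetD nums i 0)
    (fun (s : Int) (i : Int) => if 2 * i < PySem.List.len nums then s + PySem.List.pyGetD nums (2 * i) 0 else s)
    (PySem.List.pyRange 0 (PySem.List.len nums) 1) 0 0
  rw [hsplit, Prod.mk.injEq]
  constructor
  · -- first component: the total sum
    rw [show (PySem.List.pyRange 0 (PySem.List.len nums) 1) = PySem.List.pyRange 0 (PySem.List.len nums) from rfl]
    rw [PySem.List.foldl_add, PySem.List.map_pyGetD_pyRange_zero]
    simp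
  · -- second component: the even-indexed sum
    have hif : (fun (s : Int) (i : Int) =>
        if 2 * i < PySem.List.len nums then s + PySem.List.pyGetD nums (2 * i) 0 else s)
        = (fun (s : Int) (i : Int) =>
            s + (if 2 * i < PySem.List.len nums then PySem.List.pyGetD nums (2 * i) 0 else 0)) := by
      funext s i; split_ifs <;> simp
    rw [hif, PySem.List.foldl_add]
    rw [show PySem.List.len nums = ((nums.length : Int)) from rfl]
    rw [show (1 : Int) = (1 : optParam Int 1) from rfl]
    rw [show PySem.List.pyRange 0 (nums.length : Int) 1 = PySem.List.pyRange 0 (nums.length : Int) from rfl]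
    rw [PySem.List.pyRange_zero_natCast, List.map_map]
    have hfun : ((fun i : Int => if 2 * i < (nums.length : Int) then PySem.List.pyGetD nums (2 * i) 0 else 0)
        ∘ (fun k : Nat => (k : Int)))
        = (fun k : Nat => if 2 * k < nums.length then nums.getD (2 * k) 0 else 0) := by
      funext k
      simp only [Function.comp]
      have h2 : (2 : Int) * (k : Int) = ((2 * k : Nat) : Int) := by push_cast; ring
      rw [h2, PySem.List.pyGetD_natCast]
      have hc : (((2 * k : Nat) : Int) < (nums.length : Int)) ↔ 2 * k < nums.length := by
        exact_mod_cast Iff.rfl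
      rw [if_congr hc rfl rfl]
    rw [hfun, (pvEO_sum nums).1 nums.length (by omega)]
    simp

-- characterisation of B's loop result (both parity phases at once)
theorem pvB_fold (l : List Int) : ∀ (e o : Int),
    (l.foldl (fun (st : Int × Int × Bool) x =>
        if st.2.2 then (st.1 + x, st.2.1, false) else (st.1, st.2.1 + x, true)) (e, o, true)
      = (e + (pvEO l).1, o + (pvEO l).2, (l.foldl (fun (st : Int × Int × Bool) x =>
        if st.2.2 then (st.1 + x, st.2.1, false) else (st.1, st.2.1 + x, true)) (e, o, true)).2.2)) ∧
    (l.foldl (fun (st : Int × Int × Bool) x =>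
        if st.2.2 then (st.1 + x, st.2.1, false) else (st.1, st.2.1 + x, true)) (e, o, false)
      = (e + (pvEO l).2, o + (pvEO l).1, (l.foldl (fun (st : Int × Int × Bool) x =>
        if st.2.2 then (st.1 + x, st.2.1, false) else (st.1, st.2.1 + x, true)) (e, o, false)).2.2)) := by
  induction l with
  | nil => intro e o; simp [pvEO]
  | cons x t ih =>
    intro e o
    constructor
    · simp only [List.foldl_cons]
      norm_num
      rw [(ih (e + x) o).2]
      simp [pvEO]; ring
    · simp only [List.foldl_cons]
      norm_num
      rw [(ih e (o + x)).1]
      simp [pvEO]; ring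

-- ===== VERDICT (by name: the statement is the Claim_ definition above) =====
theorem house_robber_spec : Claim_equal_house_robber := by
  intro nums _
  unfold Spec_house_robber house_robber house_robber_alt
  rw [pvA_fold nums, ((pvB_fold nums 0 0).1)]
  simp only [zero_add]
  have hadd := pvEO_add nums
  set e := (pvEO nums).1
  set o := (pvEO nums).2
  have hs : nums.sum - e = o := by omega
  rw [hs]
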